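-- pv_equiv track=rewrite | github.com/AdrianSuliga/WDI | Tests/ex_A5_22-23.py | magic
-- ===== SOURCE A (Python) =====
-- def magic(T):
--     n = len(T)
--     for i in range(n):
--         for j in range(n):
--             for m in range(n):
--                 for k in range(n):
--                     rotateRow(T, i)
--                     rotateRow(T, m)
--                     if isMagicSquare(T): return True
--                     rotateBackRow(T, m)
--                     rotateBackRow(T, i)
--                     rotateRow(T, i)
--                     rotateCol(T, k)
--                     if isMagicSquare(T): return True
--                     rotateBackCol(T, k)
--                     rotateBackRow(T, i)
--                     rotateCol(T, j)
--                     rotateRow(T, m)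
--                     if isMagicSquare(T): return True
--                     rotateBackRow(T, m)
--                     rotateBackCol(T, j)
--                     rotateCol(T, j)
--                     rotateCol(T, k)
--                     if isMagicSquare(T): return True
--                     rotateBackCol(T, j)
--                     rotateBackCol(T, k)
--     return False
--
-- def rotateBackRow(T, rowToRotate):
--     n = len(T)
--     rem = T[rowToRotate][0]
--     for i in range(n - 1):
--         T[rowToRotate][i] = T[rowToRotate][i + 1]
--     T[rowToRotate][n - 1] = rem
--
-- def rotateBackCol(T, colToRotate):
--     n = len(T)
--     rem = T[0][colToRotate]
--     for i in range(n - 1):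
--         T[i][colToRotate] = T[i + 1][colToRotate]
--     T[n - 1][colToRotate] = rem
--
-- def rotateRow(T, rowToRotate):
--     n = len(T)
--     rem = T[rowToRotate][n - 1]
--     for i in range(n - 1, 0, -1):
--         T[rowToRotate][i] = T[rowToRotate][i - 1]
--     T[rowToRotate][0] = rem
--
-- def rotateCol(T, colToRotate):
--     n = len(T)
--     rem = T[n - 1][colToRotate]
--     for i in range(n - 1, 0, -1):
--         T[i][colToRotate] = T[i - 1][colToRotate]
--     T[0][colToRotate] = rem
--
-- def isMagicSquare(T):
--     n = len(T)
--     sum = sumRow(T, 0)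
--     for i in range(n):
--         if sumRow(T, i) != sum:
--             return False
--         if sumCol(T, i) != sum:
--             return False
--     return True
--
-- def sumRow(T, row):
--     sum = 0
--     for i in range(len(T)):
--         sum += T[row][i]
--     return sum
--
-- def sumCol(T, col):
--     sum = 0
--     for i in range(len(T)):
--         sum += T[i][col]
--     return sum
-- ===== SOURCE B (Python) =====
-- def _rot_row(G, r):
--     return [row[-1:] + row[:-1] if i == r else row for i, row in enumerate(G)]
--
-- def _rot_col(G, c):
--     col = [row[c] for row in G]
--     col = col[-1:] + col[:-1]
--     return [row[:c] + [v] + row[c + 1:] for row, v in zip(G, col)]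
--
-- def _is_magic(G):
--     s = sum(G[0])
--     return all(sum(row) == s for row in G) and \
--            all(sum(row[c] for row in G) == s for c in range(len(G)))
--
-- def magic(T):
--     n = len(T)
--     G = [row[:n] for row in T]
--     singles = [_rot_row(G, x) for x in range(n)] + [_rot_col(G, x) for x in range(n)]
--     return any(_is_magic(_rot_row(H, x)) or _is_magic(_rot_col(H, x))
--                for H in singles for x in range(n))
-- ===== Notes on version B (the rewrite author's own statement) =====
-- stated objective: faster
-- what changed: Instead of A's four nested index loops (O(n^4) quadruples) that mutate the grid in place and undo every rotation, B purely enumerates the 2n single-line rotations once, precomputes each once-rotated grid, and applies each second rotation to it, checking the magic property O(n^2) times instead of O(n^4) times.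
import Mathlib
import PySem

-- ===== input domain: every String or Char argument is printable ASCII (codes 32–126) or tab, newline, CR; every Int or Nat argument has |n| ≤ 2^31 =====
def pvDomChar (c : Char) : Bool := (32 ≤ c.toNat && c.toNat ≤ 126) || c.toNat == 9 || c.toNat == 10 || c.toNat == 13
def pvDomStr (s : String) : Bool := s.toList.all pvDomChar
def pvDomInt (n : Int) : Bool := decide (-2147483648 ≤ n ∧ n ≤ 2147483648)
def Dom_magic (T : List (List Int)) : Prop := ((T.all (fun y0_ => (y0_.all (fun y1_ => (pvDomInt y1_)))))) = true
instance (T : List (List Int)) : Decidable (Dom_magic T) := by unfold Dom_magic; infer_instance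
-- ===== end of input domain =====

-- B replaces A's O(n^6) quadruple loop with in-place rotate/undo by a pure O(n^4) scan over
-- the 2n once-rotated grids followed by one more single rotation; return values proved equal on Pre_.
-- (A mutates its argument in place; equivalence here is about the RETURN value only.)

-- ===== PORT A =====
-- All indices A uses come from range(n) and are in range under Pre_magic, so Python's
-- T[r][c] reads/writes are ported exactly by List.getD / List.set on Nat indices
-- (PySem.List.pyGetD_natCast / pySetD_natCast: for such indices they ARE Python's semantics).
def getCellA (T : List (List Int)) (r c : Nat) : Int := (T.getD r []).getD c 0

def setCellA (T : List (List Int)) (r c : Nat) (v : Int) : List (List Int) :=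
  T.set r ((T.getD r []).set c v)

-- 'for i in range(n-1, 0, -1): row[i] = row[i-1]'  (descending, argument = first i)
def fwdRowLoop : List Int → Nat → List Int
  | row, 0 => row
  | row, k+1 => fwdRowLoop (row.set (k+1) (row.getD k 0)) k

def rotateRowA (T : List (List Int)) (r : Nat) : List (List Int) :=
  let n := T.length
  let row := T.getD r []
  let rem := row.getD (n-1) 0
  T.set r ((fwdRowLoop row (n-1)).set 0 rem)

-- 'for i in range(n-1): row[i] = row[i+1]'  (ascending index i, fuel m = steps left)
def bwdRowLoop : List Int → Nat → Nat → List Int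
  | row, _, 0 => row
  | row, i, m+1 => bwdRowLoop (row.set i (row.getD (i+1) 0)) (i+1) m

def rotateBackRowA (T : List (List Int)) (r : Nat) : List (List Int) :=
  let n := T.length
  let row := T.getD r []
  let rem := row.getD 0 0
  T.set r ((bwdRowLoop row 0 (n-1)).set (n-1) rem)

-- 'for i in range(n-1, 0, -1): T[i][c] = T[i-1][c]'
def fwdColLoop : List (List Int) → Nat → Nat → List (List Int)
  | T, _, 0 => T
  | T, c, k+1 => fwdColLoop (setCellA T (k+1) c (getCellA T k c)) c k

def rotateColA (T : List (List Int)) (c : Nat) : List (List Int) :=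
  let n := T.length
  let rem := getCellA T (n-1) c
  setCellA (fwdColLoop T c (n-1)) 0 c rem

-- 'for i in range(n-1): T[i][c] = T[i+1][c]'
def bwdColLoop : List (List Int) → Nat → Nat → Nat → List (List Int)
  | T, _, _, 0 => T
  | T, c, i, m+1 => bwdColLoop (setCellA T i c (getCellA T (i+1) c)) c (i+1) m

def rotateBackColA (T : List (List Int)) (c : Nat) : List (List Int) :=
  let n := T.length
  let rem := getCellA T 0 c
  setCellA (bwdColLoop T c 0 (n-1)) (n-1) c rem

def sumRowA (T : List (List Int)) (r : Nat) : Int :=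
  (List.range T.length).foldl (fun s i => s + getCellA T r i) 0

def sumColA (T : List (List Int)) (c : Nat) : Int :=
  (List.range T.length).foldl (fun s i => s + getCellA T i c) 0

-- 'for i in range(n): if sumRow(T,i) != sum: return False; if sumCol(T,i) != sum: return False'
def isMagicLoop (T : List (List Int)) (s : Int) : Nat → Nat → Bool
  | _, 0 => true
  | i, m+1 =>
    if sumRowA T i != s then false
    else if sumColA T i != s then false
    else isMagicLoop T s (i+1) m

def isMagicA (T : List (List Int)) : Bool := isMagicLoop T (sumRowA T 0) 0 T.length

-- the body of A's innermost loop: threads the mutated grid, early-returns on a magic hit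
def bodyA (T : List (List Int)) (i j m k : Nat) : Bool × List (List Int) :=
  let T1 := rotateRowA (rotateRowA T i) m
  if isMagicA T1 then (true, T1) else
  let T2 := rotateColA (rotateRowA (rotateBackRowA (rotateBackRowA T1 m) i) i) k
  if isMagicA T2 then (true, T2) else
  let T3 := rotateRowA (rotateColA (rotateBackRowA (rotateBackColA T2 k) i) j) m
  if isMagicA T3 then (true, T3) else
  let T4 := rotateColA (rotateColA (rotateBackColA (rotateBackRowA T3 m) j) j) k
  if isMagicA T4 then (true, T4) else
  (false, rotateBackColA (rotateBackColA T4 j) k)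

def loopK : List (List Int) → Nat → Nat → Nat → List Nat → Bool × List (List Int)
  | T, _, _, _, [] => (false, T)
  | T, i, j, m, k :: ks =>
    let r := bodyA T i j m k
    if r.1 then r else loopK r.2 i j m ks

def loopM : List (List Int) → Nat → Nat → Nat → List Nat → Bool × List (List Int)
  | T, _, _, _, [] => (false, T)
  | T, n, i, j, m :: ms =>
    let r := loopK T i j m (List.range n)
    if r.1 then r else loopM r.2 n i j ms

def loopJ : List (List Int) → Nat → Nat → List Nat → Bool × List (List Int)
  | T, _, _, [] => (false, T)
  | T, n, i, j :: js =>
    let r := loopM T n i j (List.range n)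
    if r.1 then r else loopJ r.2 n i js

def loopI : List (List Int) → Nat → List Nat → Bool × List (List Int)
  | T, _, [] => (false, T)
  | T, n, i :: is_ =>
    let r := loopJ T n i (List.range n)
    if r.1 then r else loopI r.2 n is_

def magic (T : List (List Int)) : Bool :=
  let n := T.length
  (loopI T n (List.range n)).1

-- ===== PORT B =====
-- row[-1:] + row[:-1]
def rotOnce (row : List Int) : List Int :=
  PySem.List.slice row (some (-1)) none ++ PySem.List.slice row none (some (-1))

def rotRowB (G : List (List Int)) (r : Nat) : List (List Int) :=
  (PySem.List.enumerate G).map (fun p => if p.1 = (r : Int) then rotOnce p.2 else p.2)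

def rotColB (G : List (List Int)) (c : Nat) : List (List Int) :=
  let col := G.map (fun row => PySem.List.pyGetD row (c : Int) 0)
  let col' := rotOnce col
  (G.zip col').map (fun p =>
    PySem.List.slice p.1 none (some (c : Int)) ++ [p.2] ++ PySem.List.slice p.1 (some ((c : Int) + 1)) none)

def isMagicB (G : List (List Int)) : Bool :=
  let s := (PySem.List.pyGetD G (0 : Int) []).sum
  (G.all fun row => row.sum == s) &&
  ((List.range G.length).all fun c =>
    (G.map (fun row => PySem.List.pyGetD row (c : Int) 0)).sum == s)

def magic_alt (T : List (List Int)) : Bool :=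
  let n := T.length
  let G := T.map (fun row => PySem.List.slice row none (some (n : Int)))
  let singles := (List.range n).map (fun x => rotRowB G x) ++ (List.range n).map (fun x => rotColB G x)
  singles.any (fun H => (List.range n).any (fun x => isMagicB (rotRowB H x) || isMagicB (rotColB H x)))

-- ===== PRECONDITION & SPEC =====
-- Exactly the inputs on which the Python A returns: if any row is shorter than len(T),
-- A's in-place rotations hit an IndexError; rows may be longer (A ignores the excess columns).
def Pre_magic (T : List (List Int)) : Prop := ∀ row ∈ T, T.length ≤ row.length
instance (T : List (List Int)) : Decidable (Pre_magic T) := by unfold Pre_magic; infer_instance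

def pvWitness_magic : List (List Int) := [[1, 2], [3, 4]]

def Spec_magic (T : List (List Int)) (out : Bool) : Prop := out = magic_alt T
instance (T : List (List Int)) (out : Bool) : Decidable (Spec_magic T out) := by unfold Spec_magic; infer_instance

-- ===== CLAIM (what is proved, stated in full; the proofs are below) =====
def Claim_equal_magic : Prop := ∀ (T : List (List Int)), Dom_magic T → Pre_magic T → Spec_magic T (magic T)

-- ===== LEMMAS AND PROOFS =====

-- ---- generic list helpers ----
lemma getD_set' {α : Type} (xs : List α) (i j : Nat) (v d : α) :
    (xs.set i v).getD j d = if i = j ∧ i < xs.length then v else xs.getD j d := by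
  simp only [List.getD_eq_getElem?_getD, List.getElem?_set]
  by_cases h1 : i = j
  · subst h1
    by_cases h2 : i < xs.length
    · simp [h2]
    · simp [List.getElem?_eq_none (by omega : xs.length ≤ i), if_neg h2]
  · simp [h1]

lemma getD_out {α : Type} (xs : List α) (j : Nat) (d : α) (h : xs.length ≤ j) :
    xs.getD j d = d := by
  simp [List.getD_eq_getElem?_getD, List.getElem?_eq_none h]

-- row x of a grid, and the cell-extensionality principle
def rl (T : List (List Int)) (x : Nat) : Nat := (T.getD x []).length

lemma gridExt (T U : List (List Int)) (h1 : T.length = U.length)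
    (h2 : ∀ x, rl T x = rl U x)
    (h3 : ∀ x y, getCellA T x y = getCellA U x y) : T = U := by
  apply List.ext_getElem h1
  intro x hx hx'
  have hrow : T.getD x [] = T[x] := by simp [List.getD_eq_getElem?_getD, List.getElem?_eq_getElem hx]
  have hrow' : U.getD x [] = U[x] := by simp [List.getD_eq_getElem?_getD, List.getElem?_eq_getElem hx']
  apply List.ext_getElem
  · have := h2 x; simp only [rl, hrow, hrow'] at this; exact this
  · intro y hy hy'
    have := h3 x y
    simp only [getCellA, hrow, hrow'] at this
    simpa [List.getD_eq_getElem?_getD, List.getElem?_eq_getElem hy, List.getElem?_eq_getElem hy'] using this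

-- Pre_magic in index form
lemma pre_iff (T : List (List Int)) : Pre_magic T ↔ ∀ x < T.length, T.length ≤ rl T x := by
  constructor
  · intro h x hx
    have : T.getD x [] ∈ T := by
      have : T.getD x [] = T[x] := by simp [List.getD_eq_getElem?_getD, List.getElem?_eq_getElem hx]
      rw [this]; exact List.getElem_mem hx
    exact h _ this
  · intro h row hrow
    obtain ⟨x, hx, rfl⟩ := List.mem_iff_getElem.mp hrow
    have := h x hx
    simpa [rl, List.getD_eq_getElem?_getD, List.getElem?_eq_getElem hx] using this

-- ---- shape preservation (unconditional) ----
def Sam (T U : List (List Int)) : Prop := U.length = T.length ∧ ∀ x, rl U x = rl T x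

lemma sam_refl (T : List (List Int)) : Sam T T := ⟨rfl, fun _ => rfl⟩

lemma sam_trans {T U V : List (List Int)} (h1 : Sam T U) (h2 : Sam U V) : Sam T V :=
  ⟨h2.1.trans h1.1, fun x => (h2.2 x).trans (h1.2 x)⟩

lemma sam_setCellA (T : List (List Int)) (r c : Nat) (v : Int) : Sam T (setCellA T r c v) := by
  refine ⟨by simp [setCellA], fun x => ?_⟩
  simp only [rl, setCellA, getD_set']
  split_ifs with h
  · obtain ⟨rfl, _⟩ := h; simp
  · rfl

lemma pre_of_sam {T U : List (List Int)} (h : Sam T U) (hp : Pre_magic T) : Pre_magic U := by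
  rw [pre_iff] at hp ⊢
  intro x hx
  rw [h.1] at hx ⊢
  rw [h.2 x]
  exact hp x hx


-- ---- characterizations of the four shifting loops ----
lemma length_fwdRowLoop (row : List Int) (k : Nat) : (fwdRowLoop row k).length = row.length := by
  induction k generalizing row with
  | zero => rfl
  | succ k ih => simp [fwdRowLoop, ih]

lemma getD_fwdRowLoop (row : List Int) (k : Nat) (hk : k < row.length) (y : Nat) :
    (fwdRowLoop row k).getD y 0 =
      if 1 ≤ y ∧ y ≤ k then row.getD (y-1) 0 else row.getD y 0 := by
  induction k generalizing row with
  | zero => rw [if_neg (by omega)]; rfl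
  | succ k ih =>
    rw [fwdRowLoop, ih _ (by simp; omega)]
    simp only [getD_set']
    split_ifs <;> first | rfl | omega | (congr 1 <;> omega) | (simp_all; try omega)

lemma length_bwdRowLoop (row : List Int) (i m : Nat) : (bwdRowLoop row i m).length = row.length := by
  induction m generalizing row i with
  | zero => rfl
  | succ m ih => simp [bwdRowLoop, ih]

lemma getD_bwdRowLoop (row : List Int) (i m : Nat) (hm : i + m < row.length) (y : Nat) :
    (bwdRowLoop row i m).getD y 0 =
      if i ≤ y ∧ y < i + m then row.getD (y+1) 0 else row.getD y 0 := by
  induction m generalizing row i with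
  | zero => rw [if_neg (by omega)]; rfl
  | succ m ih =>
    rw [bwdRowLoop, ih _ _ (by simp; omega)]
    simp only [getD_set']
    split_ifs <;> first | rfl | omega | (congr 1 <;> omega) | (simp_all; try omega)

lemma sam_fwdColLoop (T : List (List Int)) (c k : Nat) : Sam T (fwdColLoop T c k) := by
  induction k generalizing T with
  | zero => exact sam_refl T
  | succ k ih => exact sam_trans (sam_setCellA ..) (ih _)

lemma sam_bwdColLoop (T : List (List Int)) (c i m : Nat) : Sam T (bwdColLoop T c i m) := by
  induction m generalizing T i with
  | zero => exact sam_refl T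
  | succ m ih => exact sam_trans (sam_setCellA ..) (ih _ _)

lemma cell_setCellA (T : List (List Int)) (r c : Nat) (v : Int) (x y : Nat)
    (hr : r < T.length) (hc : c < rl T r) :
    getCellA (setCellA T r c v) x y = if x = r ∧ y = c then v else getCellA T x y := by
  simp only [getCellA, setCellA, getD_set']
  by_cases hx : x = r
  · subst hx
    rw [if_pos ⟨rfl, hr⟩, getD_set']
    have hcl : c < (T.getD x []).length := hc
    by_cases hy : y = c
    · subst hy; rw [if_pos ⟨rfl, hcl⟩, if_pos ⟨rfl, rfl⟩]
    · rw [if_neg (by tauto), if_neg (by tauto)]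
  · rw [if_neg (by tauto), if_neg (by tauto)]

lemma cell_fwdColLoop (T : List (List Int)) (c k : Nat) (hp : Pre_magic T)
    (hk : k < T.length) (hc : c < T.length) (x y : Nat) :
    getCellA (fwdColLoop T c k) x y =
      if y = c ∧ 1 ≤ x ∧ x ≤ k then getCellA T (x-1) c else getCellA T x y := by
  induction k generalizing T with
  | zero => rw [if_neg (by omega)]; rfl
  | succ k ih =>
    have hT' := sam_setCellA T (k+1) c (getCellA T k c)
    rw [fwdColLoop, ih _ (pre_of_sam hT' hp) (by rw [hT'.1]; omega) (by rw [hT'.1]; omega)]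
    have hrc : c < rl T (k+1) := by
      have := (pre_iff T).mp hp (k+1) hk; omega
    have hS : ∀ a b, getCellA (setCellA T (k+1) c (getCellA T k c)) a b
          = if a = k+1 ∧ b = c then getCellA T k c else getCellA T a b :=
      fun a b => cell_setCellA T (k+1) c _ a b hk hrc
    simp only [hS]
    split_ifs <;> first | rfl | omega | (congr 1 <;> omega) | (simp_all; try omega)

lemma cell_bwdColLoop (T : List (List Int)) (c i m : Nat) (hp : Pre_magic T)
    (hm : i + m < T.length) (hc : c < T.length) (x y : Nat) :
    getCellA (bwdColLoop T c i m) x y =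
      if y = c ∧ i ≤ x ∧ x < i + m then getCellA T (x+1) c else getCellA T x y := by
  induction m generalizing T i with
  | zero => rw [if_neg (by omega)]; rfl
  | succ m ih =>
    have hT' := sam_setCellA T i c (getCellA T (i+1) c)
    rw [bwdColLoop, ih _ _ (pre_of_sam hT' hp) (by rw [hT'.1]; omega) (by rw [hT'.1]; omega)]
    have hrc : c < rl T i := by
      have := (pre_iff T).mp hp i (by omega); omega
    have hS : ∀ a b, getCellA (setCellA T i c (getCellA T (i+1) c)) a b
          = if a = i ∧ b = c then getCellA T (i+1) c else getCellA T a b :=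
      fun a b => cell_setCellA T i c _ a b (by omega) hrc
    simp only [hS]
    split_ifs <;> first | rfl | omega | (congr 1 <;> omega) | (simp_all; try omega)


-- ---- shape preservation for the four rotations ----
lemma sam_rotateRowA (T : List (List Int)) (r : Nat) : Sam T (rotateRowA T r) := by
  refine ⟨by simp [rotateRowA], fun x => ?_⟩
  simp only [rl, rotateRowA, getD_set']
  split_ifs with h
  · obtain ⟨rfl, _⟩ := h; simp [length_fwdRowLoop]
  · rfl

lemma sam_rotateBackRowA (T : List (List Int)) (r : Nat) : Sam T (rotateBackRowA T r) := by
  refine ⟨by simp [rotateBackRowA], fun x => ?_⟩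
  simp only [rl, rotateBackRowA, getD_set']
  split_ifs with h
  · obtain ⟨rfl, _⟩ := h; simp [length_bwdRowLoop]
  · rfl

lemma sam_rotateColA (T : List (List Int)) (c : Nat) : Sam T (rotateColA T c) := by
  unfold rotateColA
  exact sam_trans (sam_fwdColLoop ..) (sam_setCellA ..)

lemma sam_rotateBackColA (T : List (List Int)) (c : Nat) : Sam T (rotateBackColA T c) := by
  unfold rotateBackColA
  exact sam_trans (sam_bwdColLoop ..) (sam_setCellA ..)

-- ---- cell formulas for the four rotations ----
lemma cell_rotateRowA (T : List (List Int)) (r : Nat) (hp : Pre_magic T) (hr : r < T.length)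
    (x y : Nat) :
    getCellA (rotateRowA T r) x y =
      if x = r ∧ y < T.length then
        (if y = 0 then getCellA T r (T.length - 1) else getCellA T r (y-1))
      else getCellA T x y := by
  have hrl : T.length ≤ (T.getD r []).length := (pre_iff T).mp hp r hr
  simp only [rotateRowA, getCellA, getD_set']
  by_cases hx : x = r
  · subst hx
    rw [if_pos ⟨rfl, hr⟩, getD_set',
        getD_fwdRowLoop _ _ (by omega)]
    simp only [length_fwdRowLoop]
    split_ifs <;> first | rfl | omega | (congr 1 <;> omega) | (simp_all; try omega)
  · rw [if_neg (by tauto), if_neg (by tauto)]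

lemma cell_rotateBackRowA (T : List (List Int)) (r : Nat) (hp : Pre_magic T) (hr : r < T.length)
    (x y : Nat) :
    getCellA (rotateBackRowA T r) x y =
      if x = r ∧ y < T.length then
        (if y = T.length - 1 then getCellA T r 0 else getCellA T r (y+1))
      else getCellA T x y := by
  have hrl : T.length ≤ (T.getD r []).length := (pre_iff T).mp hp r hr
  simp only [rotateBackRowA, getCellA, getD_set']
  by_cases hx : x = r
  · subst hx
    rw [if_pos ⟨rfl, hr⟩, getD_set',
        getD_bwdRowLoop _ _ _ (by omega)]
    simp only [length_bwdRowLoop]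
    split_ifs <;> first | rfl | omega | (congr 1 <;> omega) | (simp_all; try omega)
  · rw [if_neg (by tauto), if_neg (by tauto)]

lemma cell_rotateColA (T : List (List Int)) (c : Nat) (hp : Pre_magic T) (hc : c < T.length)
    (x y : Nat) :
    getCellA (rotateColA T c) x y =
      if y = c ∧ x < T.length then
        (if x = 0 then getCellA T (T.length - 1) c else getCellA T (x-1) c)
      else getCellA T x y := by
  have hsam := sam_fwdColLoop T c (T.length - 1)
  have hpre := pre_of_sam hsam hp
  have hU : ∀ a b, getCellA (fwdColLoop T c (T.length - 1)) a b
      = if b = c ∧ 1 ≤ a ∧ a ≤ T.length - 1 then getCellA T (a-1) c else getCellA T a b :=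
    fun a b => cell_fwdColLoop T c (T.length - 1) hp (by omega) hc a b
  unfold rotateColA
  rw [cell_setCellA _ _ _ _ _ _ (by rw [hsam.1]; omega)
        (by rw [hsam.2]; have := (pre_iff T).mp hp 0 (by omega); omega)]
  simp only [hU]
  split_ifs <;> first | rfl | omega | (congr 1 <;> omega) | (simp_all; try omega)

lemma cell_rotateBackColA (T : List (List Int)) (c : Nat) (hp : Pre_magic T) (hc : c < T.length)
    (x y : Nat) :
    getCellA (rotateBackColA T c) x y =
      if y = c ∧ x < T.length then
        (if x = T.length - 1 then getCellA T 0 c else getCellA T (x+1) c)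
      else getCellA T x y := by
  have hsam := sam_bwdColLoop T c 0 (T.length - 1)
  have hpre := pre_of_sam hsam hp
  have hU : ∀ a b, getCellA (bwdColLoop T c 0 (T.length - 1)) a b
      = if b = c ∧ 0 ≤ a ∧ a < 0 + (T.length - 1) then getCellA T (a+1) c else getCellA T a b :=
    fun a b => cell_bwdColLoop T c 0 (T.length - 1) hp (by omega) hc a b
  unfold rotateBackColA
  rw [cell_setCellA _ _ _ _ _ _ (by rw [hsam.1]; omega)
        (by rw [hsam.2]; have := (pre_iff T).mp hp (T.length - 1) (by omega); omega)]
  simp only [hU]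
  split_ifs <;> first | rfl | omega | (congr 1 <;> omega) | (simp_all; try omega)

-- ---- the rotate/rotate-back pairs cancel ----
lemma inv_row (T : List (List Int)) (r : Nat) (hp : Pre_magic T) (hr : r < T.length) :
    rotateBackRowA (rotateRowA T r) r = T := by
  have hsam := sam_rotateRowA T r
  have hpre := pre_of_sam hsam hp
  have hA : ∀ a b, getCellA (rotateRowA T r) a b
      = if a = r ∧ b < T.length then
          (if b = 0 then getCellA T r (T.length - 1) else getCellA T r (b-1))
        else getCellA T a b := cell_rotateRowA T r hp hr
  apply gridExt _ _ (sam_trans hsam (sam_rotateBackRowA ..)).1 (fun x => by rw [(sam_trans hsam (sam_rotateBackRowA ..)).2 x])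
  intro x y
  rw [cell_rotateBackRowA _ _ hpre (by rw [hsam.1]; exact hr), hsam.1]
  simp only [hA]
  split_ifs <;> first | rfl | omega | (congr 1 <;> omega) | (simp_all; try omega)

lemma inv_col (T : List (List Int)) (c : Nat) (hp : Pre_magic T) (hc : c < T.length) :
    rotateBackColA (rotateColA T c) c = T := by
  have hsam := sam_rotateColA T c
  have hpre := pre_of_sam hsam hp
  have hA : ∀ a b, getCellA (rotateColA T c) a b
      = if b = c ∧ a < T.length then
          (if a = 0 then getCellA T (T.length - 1) c else getCellA T (a-1) c)
        else getCellA T a b := cell_rotateColA T c hp hc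
  apply gridExt _ _ (sam_trans hsam (sam_rotateBackColA ..)).1 (fun x => by rw [(sam_trans hsam (sam_rotateBackColA ..)).2 x])
  intro x y
  rw [cell_rotateBackColA _ _ hpre (by rw [hsam.1]; exact hc), hsam.1]
  simp only [hA]
  split_ifs <;> first | rfl | omega | (congr 1 <;> omega) | (simp_all; try omega)

-- distinct columns: a back-rotation slides past a forward rotation
lemma comm_back_rot_col (U : List (List Int)) (j k : Nat) (hp : Pre_magic U)
    (hj : j < U.length) (hk : k < U.length) (hjk : j ≠ k) :
    rotateBackColA (rotateColA U k) j = rotateColA (rotateBackColA U j) k := by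
  have hs1 := sam_rotateColA U k
  have hs2 := sam_rotateBackColA U j
  have hp1 := pre_of_sam hs1 hp
  have hp2 := pre_of_sam hs2 hp
  have h1 : ∀ a b, getCellA (rotateColA U k) a b
      = if b = k ∧ a < U.length then
          (if a = 0 then getCellA U (U.length - 1) k else getCellA U (a-1) k)
        else getCellA U a b := cell_rotateColA U k hp hk
  have h2 : ∀ a b, getCellA (rotateBackColA U j) a b
      = if b = j ∧ a < U.length then
          (if a = U.length - 1 then getCellA U 0 j else getCellA U (a+1) j)
        else getCellA U a b := cell_rotateBackColA U j hp hj
  apply gridExt _ _ ((sam_trans hs1 (sam_rotateBackColA ..)).1.trans (sam_trans hs2 (sam_rotateColA ..)).1.symm)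
    (fun x => by rw [(sam_trans hs1 (sam_rotateBackColA ..)).2 x, (sam_trans hs2 (sam_rotateColA ..)).2 x])
  intro x y
  rw [cell_rotateBackColA _ _ hp1 (by rw [hs1.1]; exact hj), hs1.1,
      cell_rotateColA _ _ hp2 (by rw [hs2.1]; exact hk), hs2.1]
  simp only [h1, h2]
  split_ifs <;> first | rfl | omega | (congr 1 <;> omega) | (simp_all; try omega)


-- ---- B-side helpers in drop/take form ----
lemma rotOnce_eq (row : List Int) :
    rotOnce row = row.drop (row.length - 1) ++ row.dropLast := by
  simp [rotOnce, PySem.List.slice_from_neg_one, PySem.List.slice_to_neg_one]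

lemma length_rotOnce (row : List Int) : (rotOnce row).length = row.length := by
  simp [rotOnce_eq]

lemma getD_rotOnce (row : List Int) (y : Nat) (h : 0 < row.length) :
    (rotOnce row).getD y 0 =
      if y = 0 then row.getD (row.length - 1) 0
      else if y < row.length then row.getD (y-1) 0 else 0 := by
  rw [rotOnce_eq]
  have hld : (row.drop (row.length - 1)).length = 1 := by simp; omega
  simp only [List.getD_eq_getElem?_getD, List.getElem?_append, hld]
  by_cases h0 : y = 0
  · subst h0
    rw [if_pos (show 0 < 1 by omega), if_pos rfl, List.getElem?_drop,
        show row.length - 1 + 0 = row.length - 1 by omega]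
  · rw [if_neg (show ¬ y < 1 by omega), if_neg h0]
    by_cases h1 : y < row.length
    · rw [if_pos h1,
          List.getElem?_eq_getElem (show y - 1 < row.dropLast.length by
            simp [List.length_dropLast]; omega),
          List.getElem_dropLast,
          List.getElem?_eq_getElem (show y - 1 < row.length by omega)]
    · rw [if_neg h1,
          List.getElem?_eq_none (show row.dropLast.length ≤ y - 1 by
            simp [List.length_dropLast]; omega)]
      rfl

-- row x of rotRowB
lemma row_rotRowB (G : List (List Int)) (r x : Nat) :
    (rotRowB G r).getD x [] =
      if x < G.length then (if x = r then rotOnce (G.getD x []) else G.getD x []) else [] := by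
  simp only [rotRowB, List.getD_eq_getElem?_getD, List.getElem?_map]
  by_cases hx : x < G.length
  · rw [show (PySem.List.enumerate G)[x]? = some ((0:Int) + x, G[x]) from (by
      rw [PySem.List.getElem?_enumerate, List.getElem?_eq_getElem hx]; rfl)]
    simp only [Option.map_some, Option.getD_some, if_pos hx, zero_add, Nat.cast_inj]
    rw [List.getElem?_eq_getElem hx]
    rfl
  · rw [List.getElem?_eq_none (by rw [PySem.List.length_enumerate]; omega)]
    simp [hx]

lemma length_rotRowB (G : List (List Int)) (r : Nat) : (rotRowB G r).length = G.length := by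
  simp [rotRowB, PySem.List.length_enumerate]

lemma cell_rotRowB (G : List (List Int)) (r : Nat) (n : Nat)
    (hlen : G.length = n) (hsq : ∀ x < n, rl G x = n) (hr : r < n) (x y : Nat) :
    getCellA (rotRowB G r) x y =
      if x = r ∧ y < n then
        (if y = 0 then getCellA G r (n-1) else getCellA G r (y-1))
      else getCellA G x y := by
  simp only [getCellA, row_rotRowB, hlen]
  by_cases hx : x < n
  · rw [if_pos hx]
    by_cases hxr : x = r
    · subst hxr
      rw [if_pos rfl, getD_rotOnce _ _ (by have := hsq x hx; simp only [rl] at this; omega)]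
      have hl : (G.getD x []).length = n := hsq x hx
      rw [hl]
      split_ifs <;>
        first | rfl | omega | (congr 1 <;> omega)
              | (rw [getD_out (G.getD x []) y 0 (by omega)])
    · rw [if_neg hxr, if_neg (by tauto)]
  · rw [if_neg hx, if_neg (by omega : ¬(x = r ∧ y < n))]
    rw [getD_out G x [] (by omega)]

lemma rl_rotRowB (G : List (List Int)) (r x : Nat) : rl (rotRowB G r) x = rl G x := by
  simp only [rl, row_rotRowB]
  split_ifs with h1 h2
  · rw [length_rotOnce]
  · rfl
  · rw [getD_out _ _ _ (by omega)]


lemma getD_splice (row : List Int) (c : Nat) (v : Int) (y : Nat) (hc : c ≤ row.length) :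
    (row.take c ++ v :: row.drop (c+1)).getD y 0 = if y = c then v else row.getD y 0 := by
  have hlt : (row.take c).length = c := by simp [List.length_take]; omega
  simp only [List.getD_eq_getElem?_getD, List.getElem?_append, hlt]
  by_cases h1 : y < c
  · rw [if_pos h1, if_neg (by omega), List.getElem?_take, if_pos h1]
  · rw [if_neg h1]
    by_cases h2 : y = c
    · subst h2
      rw [if_pos rfl, Nat.sub_self, List.getElem?_cons_zero]
      rfl
    · rw [if_neg h2, show y - c = (y - c - 1) + 1 from by omega,
          List.getElem?_cons_succ, List.getElem?_drop,
          show c + 1 + (y - c - 1) = y from by omega]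

lemma getD_map_col (G : List (List Int)) (c i : Nat) :
    (G.map (fun row => row.getD c 0)).getD i 0 = getCellA G i c := by
  simp only [List.getD_eq_getElem?_getD, List.getElem?_map, getCellA]
  cases h : G[i]? <;> simp

lemma rotColB_eq (G : List (List Int)) (c : Nat) :
    rotColB G c = (G.zip (rotOnce (G.map (fun row => row.getD c 0)))).map
      (fun p => p.1.take c ++ p.2 :: p.1.drop (c+1)) := by
  simp only [rotColB, PySem.List.pyGetD_natCast]
  congr 1
  funext p
  rw [PySem.List.slice_to_natCast, show ((c:Int)+1) = (((c+1:Nat)):Int) from by push_cast; ring,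
      PySem.List.slice_from_natCast]
  simp

lemma length_rotColB (G : List (List Int)) (c : Nat) : (rotColB G c).length = G.length := by
  rw [rotColB_eq, List.length_map, List.length_zip, length_rotOnce, List.length_map, min_self]

lemma row_rotColB (G : List (List Int)) (c x : Nat) (hx : x < G.length) :
    (rotColB G c).getD x [] =
      (G.getD x []).take c ++
        (rotOnce (G.map (fun row => row.getD c 0))).getD x 0 :: (G.getD x []).drop (c+1) := by
  rw [rotColB_eq]
  have hcl : (rotOnce (G.map (fun row => row.getD c 0))).length = G.length := by
    rw [length_rotOnce, List.length_map]
  have hzl : x < (G.zip (rotOnce (G.map (fun row => row.getD c 0)))).length := by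
    rw [List.length_zip, hcl, min_self]; exact hx
  rw [List.getD_eq_getElem?_getD, List.getElem?_map, List.getElem?_eq_getElem hzl,
      List.getElem_zip]
  simp only [Option.map_some, Option.getD_some]
  rw [show G[x] = G.getD x [] from by
        rw [List.getD_eq_getElem?_getD, List.getElem?_eq_getElem hx]
        rfl,
      show (rotOnce (G.map (fun row => row.getD c 0)))[x]
          = (rotOnce (G.map (fun row => row.getD c 0))).getD x 0 from by
        rw [List.getD_eq_getElem?_getD, List.getElem?_eq_getElem (hcl ▸ hx)]
        rfl]

lemma rl_rotColB (G : List (List Int)) (c x : Nat) (n : Nat)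
    (hlen : G.length = n) (hsq : ∀ x < n, rl G x = n) (hc : c < n) :
    rl (rotColB G c) x = rl G x := by
  by_cases hx : x < G.length
  · have hrl : (G.getD x []).length = n := hsq x (hlen ▸ hx)
    have hg : G[x]?.getD [] = G.getD x [] := (List.getD_eq_getElem?_getD).symm
    simp only [rl, row_rotColB G c x hx, List.length_append, List.length_take,
      List.length_cons, List.length_drop, hg, hrl]
    omega
  · simp only [rl]
    rw [getD_out (rotColB G c) x [] (by rw [length_rotColB]; omega), getD_out G x [] (by omega)]

lemma cell_rotColB (G : List (List Int)) (c : Nat) (n : Nat)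
    (hlen : G.length = n) (hsq : ∀ x < n, rl G x = n) (hc : c < n) (x y : Nat) :
    getCellA (rotColB G c) x y =
      if y = c ∧ x < n then
        (if x = 0 then getCellA G (n-1) c else getCellA G (x-1) c)
      else getCellA G x y := by
  have hml : (G.map (fun row => row.getD c 0)).length = n := by rw [List.length_map, hlen]
  by_cases hx : x < n
  · have hrl : (G.getD x []).length = n := hsq x hx
    simp only [getCellA] at *
    rw [row_rotColB G c x (by omega), getD_splice _ _ _ _ (by omega),
        getD_rotOnce _ _ (by rw [hml]; omega), hml]
    simp only [getD_map_col, getCellA]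
    split_ifs <;> first | rfl | omega | (congr 1 <;> omega) | (rw [getD_out (G.getD x []) y 0 (by omega)])
  · rw [if_neg (by omega : ¬(y = c ∧ x < n))]
    simp only [getCellA]
    rw [getD_out (rotColB G c) x [] (by rw [length_rotColB]; omega), getD_out G x [] (by omega)]


-- ---- the n×n prefix grid ----
def sqTo (n : Nat) (T : List (List Int)) : List (List Int) := T.map (fun row => row.take n)

lemma length_sqTo (n : Nat) (T : List (List Int)) : (sqTo n T).length = T.length := by
  simp [sqTo]

lemma row_sqTo (n : Nat) (T : List (List Int)) (x : Nat) :
    (sqTo n T).getD x [] = (T.getD x []).take n := by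
  simp only [sqTo, List.getD_eq_getElem?_getD, List.getElem?_map]
  cases h : T[x]? <;> simp

lemma rl_sqTo (n : Nat) (T : List (List Int)) (x : Nat) :
    rl (sqTo n T) x = min n (rl T x) := by
  simp only [rl]
  rw [row_sqTo, List.length_take]

lemma cell_sqTo (n : Nat) (T : List (List Int)) (x y : Nat) :
    getCellA (sqTo n T) x y = if y < n then getCellA T x y else 0 := by
  simp only [getCellA]
  rw [row_sqTo]
  simp only [List.getD_eq_getElem?_getD, List.getElem?_take]
  split_ifs <;> rfl

lemma sq_sqTo (T : List (List Int)) (hp : Pre_magic T) :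
    ∀ x < T.length, rl (sqTo T.length T) x = T.length := by
  intro x hx
  rw [rl_sqTo]
  have := (pre_iff T).mp hp x hx
  omega

-- ---- the prefix grid commutes with the rotations ----
lemma comm_row (T : List (List Int)) (r : Nat) (hp : Pre_magic T) (hr : r < T.length) :
    sqTo T.length (rotateRowA T r) = rotRowB (sqTo T.length T) r := by
  have hsam := sam_rotateRowA T r
  apply gridExt
  · rw [length_sqTo, hsam.1, length_rotRowB, length_sqTo]
  · intro x
    rw [rl_sqTo, rl_rotRowB, rl_sqTo, hsam.2 x]
  · intro x y
    rw [cell_sqTo, cell_rotRowB (sqTo T.length T) r T.length (by rw [length_sqTo])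
          (sq_sqTo T hp) hr, cell_rotateRowA T r hp hr]
    simp only [cell_sqTo]
    split_ifs <;> first | rfl | omega | (congr 1 <;> omega)

lemma comm_col (T : List (List Int)) (c : Nat) (hp : Pre_magic T) (hc : c < T.length) :
    sqTo T.length (rotateColA T c) = rotColB (sqTo T.length T) c := by
  have hsam := sam_rotateColA T c
  apply gridExt
  · rw [length_sqTo, hsam.1, length_rotColB, length_sqTo]
  · intro x
    rw [rl_sqTo, rl_rotColB (sqTo T.length T) c x T.length (by rw [length_sqTo])
          (sq_sqTo T hp) hc, rl_sqTo, hsam.2 x]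
  · intro x y
    rw [cell_sqTo, cell_rotColB (sqTo T.length T) c T.length (by rw [length_sqTo])
          (sq_sqTo T hp) hc, cell_rotateColA T c hp hc]
    simp only [cell_sqTo]
    split_ifs <;> first | rfl | omega | (congr 1 <;> omega)


-- ---- sums and the magic test ----
lemma getD_of_lt {α : Type} (l : List α) (i : Nat) (d : α) (h : i < l.length) :
    l.getD i d = l[i] := by
  rw [List.getD_eq_getElem?_getD, List.getElem?_eq_getElem h]
  rfl

lemma foldl_add_int (f : Nat → Int) (l : List Nat) (a : Int) :
    l.foldl (fun s i => s + f i) a = a + (l.map f).sum := by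
  induction l generalizing a with
  | nil => simp
  | cons h t ih => simp [ih, add_assoc]

lemma sumRowA_eq (T : List (List Int)) (r : Nat) :
    sumRowA T r = ((List.range T.length).map (fun i => getCellA T r i)).sum := by
  rw [sumRowA, foldl_add_int, zero_add]

lemma sumColA_eq (T : List (List Int)) (c : Nat) :
    sumColA T c = ((List.range T.length).map (fun i => getCellA T i c)).sum := by
  rw [sumColA, foldl_add_int, zero_add]

lemma rowsum_sqTo (T : List (List Int)) (hp : Pre_magic T) (x : Nat) (hx : x < T.length) :
    ((sqTo T.length T).getD x []).sum = sumRowA T x := by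
  rw [row_sqTo, sumRowA_eq]
  congr 1
  apply List.ext_getElem
  · have hpre := (pre_iff T).mp hp x hx
    unfold rl at hpre
    rw [List.length_take, List.length_map, List.length_range]
    omega
  · intro i h1 h2
    rw [List.length_take] at h1
    have hpre := (pre_iff T).mp hp x hx
    unfold rl at hpre
    rw [List.getElem_take, List.getElem_map, List.getElem_range]
    simp only [getCellA]
    exact (getD_of_lt _ _ _ (by omega)).symm

lemma colsum_sqTo (T : List (List Int)) (hp : Pre_magic T) (c : Nat) (hc : c < T.length) :
    ((sqTo T.length T).map (fun row => row.getD c 0)).sum = sumColA T c := by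
  rw [sumColA_eq]
  congr 1
  apply List.ext_getElem
  · simp [sqTo]
  · intro i h1 h2
    simp only [List.length_map, length_sqTo] at h1
    rw [List.getElem_map, List.getElem_map, List.getElem_range]
    have hi : i < (sqTo T.length T).length := by rw [length_sqTo]; omega
    have hrow : (sqTo T.length T)[i] = (T.getD i []).take T.length := by
      have h' := row_sqTo T.length T i
      rw [getD_of_lt _ _ _ hi] at h'
      exact h'
    rw [hrow]
    simp only [getCellA, List.getD_eq_getElem?_getD, List.getElem?_take, if_pos hc]

lemma isMagicLoop_iff (T : List (List Int)) (s : Int) (m i : Nat) :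
    isMagicLoop T s i m = true ↔ ∀ t < m, sumRowA T (i+t) = s ∧ sumColA T (i+t) = s := by
  induction m generalizing i with
  | zero => simp [isMagicLoop]
  | succ m ih =>
    rw [isMagicLoop]
    by_cases h1 : sumRowA T i = s
    · rw [if_neg (by simp [h1])]
      by_cases h2 : sumColA T i = s
      · rw [if_neg (by simp [h2]), ih]
        constructor
        · intro h t ht
          rcases Nat.eq_zero_or_pos t with rfl | hpos
          · simpa using ⟨h1, h2⟩
          · have := h (t-1) (by omega)
            have harg : i + 1 + (t-1) = i + t := by omega
            rw [harg] at this
            exact this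
        · intro h t ht
          have := h (t+1) (by omega)
          have harg : i + (t+1) = i + 1 + t := by omega
          rw [harg] at this
          exact this
      · rw [if_pos (by simp [h2])]
        constructor
        · intro hft; exact absurd hft (by simp)
        · intro hall
          exact absurd (by simpa using (hall 0 (by omega)).2) h2
    · rw [if_pos (by simp [h1])]
      constructor
      · intro hft; exact absurd hft (by simp)
      · intro hall
        exact absurd (by simpa using (hall 0 (by omega)).1) h1

lemma isMagicA_iff (T : List (List Int)) :
    isMagicA T = true ↔
      ∀ x < T.length, sumRowA T x = sumRowA T 0 ∧ sumColA T x = sumRowA T 0 := by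
  rw [isMagicA, isMagicLoop_iff]
  simp

lemma isMagicB_iff (G : List (List Int)) :
    isMagicB G = true ↔
      (∀ row ∈ G, row.sum = (G.getD 0 []).sum) ∧
      (∀ c < G.length, (G.map (fun row => row.getD c 0)).sum = (G.getD 0 []).sum) := by
  simp [isMagicB, PySem.List.pyGetD_zero, PySem.List.pyGetD_natCast, List.all_eq_true]

lemma bool_eq_of_iff {a b : Bool} (h : a = true ↔ b = true) : a = b := by
  cases a <;> cases b <;> simp_all

lemma isMagic_align (T : List (List Int)) (hp : Pre_magic T) :
    isMagicA T = isMagicB (sqTo T.length T) := by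
  rcases Nat.eq_zero_or_pos T.length with h0 | hn
  · have hT : T = [] := List.length_eq_zero_iff.mp h0
    subst hT
    rfl
  · apply bool_eq_of_iff
    rw [isMagicA_iff, isMagicB_iff]
    have hs : ((sqTo T.length T).getD 0 []).sum = sumRowA T 0 := rowsum_sqTo T hp 0 hn
    rw [hs, length_sqTo]
    constructor
    · intro h
      constructor
      · intro row hrow
        obtain ⟨x, hx, rfl⟩ := List.mem_iff_getElem.mp hrow
        rw [length_sqTo] at hx
        have : (sqTo T.length T)[x] = (sqTo T.length T).getD x [] := by
          rw [getD_of_lt _ _ _ (by rw [length_sqTo]; omega)]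
        rw [this, rowsum_sqTo T hp x hx]
        exact (h x hx).1
      · intro c hc
        rw [colsum_sqTo T hp c hc]
        exact (h c hc).2
    · intro ⟨hrows, hcols⟩ x hx
      constructor
      · have hmem : (sqTo T.length T).getD x [] ∈ sqTo T.length T := by
          rw [getD_of_lt _ _ _ (show x < (sqTo T.length T).length by rw [length_sqTo]; omega)]
          exact List.getElem_mem _
        have := hrows _ hmem
        rwa [rowsum_sqTo T hp x hx] at this
      · have := hcols x hx
        rwa [colsum_sqTo T hp x hx] at this


-- ---- what one pass of A's inner body tests ----
def chk (T : List (List Int)) (i j m k : Nat) : Bool :=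
  isMagicA (rotateRowA (rotateRowA T i) m) || isMagicA (rotateColA (rotateRowA T i) k) ||
  isMagicA (rotateRowA (rotateColA T j) m) || isMagicA (rotateColA (rotateColA T j) k)

lemma bodyA_spec (T : List (List Int)) (i j m k : Nat) (hp : Pre_magic T)
    (hi : i < T.length) (hj : j < T.length) (hm : m < T.length) (hk : k < T.length) :
    (bodyA T i j m k).1 = chk T i j m k ∧
    (chk T i j m k = false → (bodyA T i j m k).2 = T) := by
  have pRi := pre_of_sam (sam_rotateRowA T i) hp
  have pCj := pre_of_sam (sam_rotateColA T j) hp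
  have h1 : rotateBackRowA (rotateBackRowA (rotateRowA (rotateRowA T i) m) m) i = T := by
    rw [inv_row (rotateRowA T i) m pRi (by rw [(sam_rotateRowA T i).1]; exact hm),
        inv_row T i hp hi]
  have h2 : rotateBackRowA (rotateBackColA (rotateColA (rotateRowA T i) k) k) i = T := by
    rw [inv_col (rotateRowA T i) k pRi (by rw [(sam_rotateRowA T i).1]; exact hk),
        inv_row T i hp hi]
  have h3 : rotateBackColA (rotateBackRowA (rotateRowA (rotateColA T j) m) m) j = T := by
    rw [inv_row (rotateColA T j) m pCj (by rw [(sam_rotateColA T j).1]; exact hm),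
        inv_col T j hp hj]
  have h4 : rotateBackColA (rotateBackColA (rotateColA (rotateColA T j) k) j) k = T := by
    by_cases hjk : j = k
    · subst hjk
      rw [inv_col (rotateColA T j) j pCj (by rw [(sam_rotateColA T j).1]; exact hj),
          inv_col T j hp hj]
    · rw [comm_back_rot_col (rotateColA T j) j k pCj
            (by rw [(sam_rotateColA T j).1]; exact hj)
            (by rw [(sam_rotateColA T j).1]; exact hk) hjk,
          inv_col T j hp hj, inv_col T k hp hk]
  constructor
  · simp only [bodyA, chk]
    rw [h1, h2, h3, h4]
    split_ifs <;> simp_all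
  · intro hfalse
    simp only [chk, Bool.or_eq_false_iff] at hfalse
    simp only [bodyA]
    rw [h1, h2, h3, h4]
    split_ifs <;> simp_all

lemma loopK_spec (T : List (List Int)) (i j m : Nat) (ks : List Nat) (hp : Pre_magic T)
    (hi : i < T.length) (hj : j < T.length) (hm : m < T.length)
    (hks : ∀ k ∈ ks, k < T.length) :
    (loopK T i j m ks).1 = ks.any (fun k => chk T i j m k) ∧
    ((loopK T i j m ks).1 = false → (loopK T i j m ks).2 = T) := by
  induction ks with
  | nil => simp [loopK]
  | cons k ks ih =>
    have hk := hks k (List.mem_cons_self ..)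
    have hspec := bodyA_spec T i j m k hp hi hj hm hk
    simp only [loopK]
    by_cases hc : chk T i j m k = true
    · have hb1 : (bodyA T i j m k).1 = true := by rw [hspec.1]; exact hc
      rw [if_pos hb1]
      refine ⟨by rw [hb1]; simp [List.any_cons, hc], fun hfx => absurd hfx (by rw [hb1]; simp)⟩
    · have hcf : chk T i j m k = false := by
        cases hcc : chk T i j m k
        · rfl
        · exact absurd hcc hc
      have hb0 : (bodyA T i j m k).1 = false := by rw [hspec.1]; exact hcf
      rw [if_neg (by rw [hb0]; simp), hspec.2 hcf]
      have htail := ih (fun k hkk => hks k (List.mem_cons_of_mem _ hkk))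
      exact ⟨by rw [htail.1]; simp [List.any_cons, hcf], htail.2⟩

lemma loopM_spec (T : List (List Int)) (n i j : Nat) (ms : List Nat) (hp : Pre_magic T)
    (hn : n = T.length) (hi : i < T.length) (hj : j < T.length)
    (hms : ∀ m ∈ ms, m < T.length) :
    (loopM T n i j ms).1 = ms.any (fun m => (List.range n).any (fun k => chk T i j m k)) ∧
    ((loopM T n i j ms).1 = false → (loopM T n i j ms).2 = T) := by
  induction ms with
  | nil => simp [loopM]
  | cons m ms ih =>
    have hm := hms m (List.mem_cons_self ..)
    have hspec := loopK_spec T i j m (List.range n) hp hi hj hm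
      (fun k hkk => by rw [← hn]; exact List.mem_range.mp hkk)
    simp only [loopM]
    by_cases hc : (List.range n).any (fun k => chk T i j m k) = true
    · have hb1 : (loopK T i j m (List.range n)).1 = true := by rw [hspec.1]; exact hc
      rw [if_pos hb1]
      refine ⟨by rw [hb1]; simp [List.any_cons, hc], fun hfx => absurd hfx (by rw [hb1]; simp)⟩
    · have hcf : (List.range n).any (fun k => chk T i j m k) = false := by
        cases hcc : (List.range n).any (fun k => chk T i j m k)
        · rfl
        · exact absurd hcc hc
      have hb0 : (loopK T i j m (List.range n)).1 = false := by rw [hspec.1]; exact hcf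
      rw [if_neg (by rw [hb0]; simp), hspec.2 hb0]
      have htail := ih (fun m hmm => hms m (List.mem_cons_of_mem _ hmm))
      exact ⟨by rw [htail.1]; simp [List.any_cons, hcf], htail.2⟩

lemma loopJ_spec (T : List (List Int)) (n i : Nat) (js : List Nat) (hp : Pre_magic T)
    (hn : n = T.length) (hi : i < T.length)
    (hjs : ∀ j ∈ js, j < T.length) :
    (loopJ T n i js).1 = js.any (fun j => (List.range n).any (fun m =>
        (List.range n).any (fun k => chk T i j m k))) ∧
    ((loopJ T n i js).1 = false → (loopJ T n i js).2 = T) := by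
  induction js with
  | nil => simp [loopJ]
  | cons j js ih =>
    have hj := hjs j (List.mem_cons_self ..)
    have hspec := loopM_spec T n i j (List.range n) hp hn hi hj
      (fun m hmm => by rw [← hn]; exact List.mem_range.mp hmm)
    simp only [loopJ]
    by_cases hc : (List.range n).any (fun m => (List.range n).any (fun k => chk T i j m k)) = true
    · have hb1 : (loopM T n i j (List.range n)).1 = true := by rw [hspec.1]; exact hc
      rw [if_pos hb1]
      refine ⟨by rw [hb1]; simp [List.any_cons, hc], fun hfx => absurd hfx (by rw [hb1]; simp)⟩
    · have hcf : (List.range n).any (fun m => (List.range n).any (fun k => chk T i j m k)) = false := by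
        cases hcc : (List.range n).any (fun m => (List.range n).any (fun k => chk T i j m k))
        · rfl
        · exact absurd hcc hc
      have hb0 : (loopM T n i j (List.range n)).1 = false := by rw [hspec.1]; exact hcf
      rw [if_neg (by rw [hb0]; simp), hspec.2 hb0]
      have htail := ih (fun j hjj => hjs j (List.mem_cons_of_mem _ hjj))
      exact ⟨by rw [htail.1]; simp [List.any_cons, hcf], htail.2⟩

lemma loopI_spec (T : List (List Int)) (n : Nat) (is_ : List Nat) (hp : Pre_magic T)
    (hn : n = T.length)
    (his : ∀ i ∈ is_, i < T.length) :
    (loopI T n is_).1 = is_.any (fun i => (List.range n).any (fun j => (List.range n).any (fun m =>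
        (List.range n).any (fun k => chk T i j m k)))) ∧
    ((loopI T n is_).1 = false → (loopI T n is_).2 = T) := by
  induction is_ with
  | nil => simp [loopI]
  | cons i is_ ih =>
    have hi := his i (List.mem_cons_self ..)
    have hspec := loopJ_spec T n i (List.range n) hp hn hi
      (fun j hjj => by rw [← hn]; exact List.mem_range.mp hjj)
    simp only [loopI]
    by_cases hc : (List.range n).any (fun j => (List.range n).any (fun m =>
        (List.range n).any (fun k => chk T i j m k))) = true
    · have hb1 : (loopJ T n i (List.range n)).1 = true := by rw [hspec.1]; exact hc
      rw [if_pos hb1]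
      refine ⟨by rw [hb1]; simp [List.any_cons, hc], fun hfx => absurd hfx (by rw [hb1]; simp)⟩
    · have hcf : (List.range n).any (fun j => (List.range n).any (fun m =>
          (List.range n).any (fun k => chk T i j m k))) = false := by
        cases hcc : (List.range n).any (fun j => (List.range n).any (fun m =>
          (List.range n).any (fun k => chk T i j m k)))
        · rfl
        · exact absurd hcc hc
      have hb0 : (loopJ T n i (List.range n)).1 = false := by rw [hspec.1]; exact hcf
      rw [if_neg (by rw [hb0]; simp), hspec.2 hb0]
      have htail := ih (fun i hii => his i (List.mem_cons_of_mem _ hii))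
      exact ⟨by rw [htail.1]; simp [List.any_cons, hcf], htail.2⟩

lemma magic_char (T : List (List Int)) (hp : Pre_magic T) :
    magic T = (List.range T.length).any (fun i => (List.range T.length).any (fun j =>
      (List.range T.length).any (fun m => (List.range T.length).any (fun k => chk T i j m k)))) := by
  simp only [magic]
  exact (loopI_spec T T.length (List.range T.length) hp rfl
    (fun i hii => List.mem_range.mp hii)).1


-- ---- each of A's four double-rotation tests equals B's test on the prefix grid ----
lemma bridge_rr (T : List (List Int)) (i m : Nat) (hp : Pre_magic T)
    (hi : i < T.length) (hm : m < T.length) :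
    isMagicA (rotateRowA (rotateRowA T i) m)
      = isMagicB (rotRowB (rotRowB (sqTo T.length T) i) m) := by
  have s1 := sam_rotateRowA T i
  have p1 := pre_of_sam s1 hp
  have e := isMagic_align (rotateRowA (rotateRowA T i) m)
    (pre_of_sam (sam_rotateRowA (rotateRowA T i) m) p1)
  rw [(sam_rotateRowA (rotateRowA T i) m).1, s1.1] at e
  have c1 := comm_row (rotateRowA T i) m p1 (by rw [s1.1]; exact hm)
  rw [s1.1] at c1
  rw [e, c1, comm_row T i hp hi]

lemma bridge_rc (T : List (List Int)) (i k : Nat) (hp : Pre_magic T)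
    (hi : i < T.length) (hk : k < T.length) :
    isMagicA (rotateColA (rotateRowA T i) k)
      = isMagicB (rotColB (rotRowB (sqTo T.length T) i) k) := by
  have s1 := sam_rotateRowA T i
  have p1 := pre_of_sam s1 hp
  have e := isMagic_align (rotateColA (rotateRowA T i) k)
    (pre_of_sam (sam_rotateColA (rotateRowA T i) k) p1)
  rw [(sam_rotateColA (rotateRowA T i) k).1, s1.1] at e
  have c1 := comm_col (rotateRowA T i) k p1 (by rw [s1.1]; exact hk)
  rw [s1.1] at c1
  rw [e, c1, comm_row T i hp hi]

lemma bridge_cr (T : List (List Int)) (j m : Nat) (hp : Pre_magic T)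
    (hj : j < T.length) (hm : m < T.length) :
    isMagicA (rotateRowA (rotateColA T j) m)
      = isMagicB (rotRowB (rotColB (sqTo T.length T) j) m) := by
  have s1 := sam_rotateColA T j
  have p1 := pre_of_sam s1 hp
  have e := isMagic_align (rotateRowA (rotateColA T j) m)
    (pre_of_sam (sam_rotateRowA (rotateColA T j) m) p1)
  rw [(sam_rotateRowA (rotateColA T j) m).1, s1.1] at e
  have c1 := comm_row (rotateColA T j) m p1 (by rw [s1.1]; exact hm)
  rw [s1.1] at c1
  rw [e, c1, comm_col T j hp hj]

lemma bridge_cc (T : List (List Int)) (j k : Nat) (hp : Pre_magic T)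
    (hj : j < T.length) (hk : k < T.length) :
    isMagicA (rotateColA (rotateColA T j) k)
      = isMagicB (rotColB (rotColB (sqTo T.length T) j) k) := by
  have s1 := sam_rotateColA T j
  have p1 := pre_of_sam s1 hp
  have e := isMagic_align (rotateColA (rotateColA T j) k)
    (pre_of_sam (sam_rotateColA (rotateColA T j) k) p1)
  rw [(sam_rotateColA (rotateColA T j) k).1, s1.1] at e
  have c1 := comm_col (rotateColA T j) k p1 (by rw [s1.1]; exact hk)
  rw [s1.1] at c1
  rw [e, c1, comm_col T j hp hj]

lemma slice_G (T : List (List Int)) :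
    T.map (fun row => PySem.List.slice row none (some ((T.length : Nat) : Int)))
      = sqTo T.length T := by
  unfold sqTo
  congr 1
  funext row
  exact PySem.List.slice_to_natCast ..

-- ===== VERDICT (by name: the statement is the Claim_ definition above) =====
theorem magic_spec : Claim_equal_magic := by
  intro T _ hpre
  unfold Spec_magic
  apply bool_eq_of_iff
  rw [magic_char T hpre]
  simp only [magic_alt, slice_G, List.any_eq_true, List.mem_append, List.mem_map,
    List.mem_range, Bool.or_eq_true]
  constructor
  · rintro ⟨i, hi, j, hj, m, hm, k, hk, hchk⟩
    simp only [chk, Bool.or_eq_true] at hchk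
    rcases hchk with ((h | h) | h) | h
    · exact ⟨rotRowB (sqTo T.length T) i, Or.inl ⟨i, hi, rfl⟩, m, hm,
        Or.inl (by rw [← bridge_rr T i m hpre hi hm]; exact h)⟩
    · exact ⟨rotRowB (sqTo T.length T) i, Or.inl ⟨i, hi, rfl⟩, k, hk,
        Or.inr (by rw [← bridge_rc T i k hpre hi hk]; exact h)⟩
    · exact ⟨rotColB (sqTo T.length T) j, Or.inr ⟨j, hj, rfl⟩, m, hm,
        Or.inl (by rw [← bridge_cr T j m hpre hj hm]; exact h)⟩
    · exact ⟨rotColB (sqTo T.length T) j, Or.inr ⟨j, hj, rfl⟩, k, hk,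
        Or.inr (by rw [← bridge_cc T j k hpre hj hk]; exact h)⟩
  · rintro ⟨H, hH | hH, x, hx, hmag⟩ <;> obtain ⟨a, ha, rfl⟩ := hH
    · rcases hmag with h | h
      · exact ⟨a, ha, 0, by omega, x, hx, 0, by omega, by
          simp only [chk, Bool.or_eq_true]
          exact Or.inl (Or.inl (Or.inl (by rw [bridge_rr T a x hpre ha hx]; exact h)))⟩
      · exact ⟨a, ha, 0, by omega, 0, by omega, x, hx, by
          simp only [chk, Bool.or_eq_true]
          exact Or.inl (Or.inl (Or.inr (by rw [bridge_rc T a x hpre ha hx]; exact h)))⟩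
    · rcases hmag with h | h
      · exact ⟨0, by omega, a, ha, x, hx, 0, by omega, by
          simp only [chk, Bool.or_eq_true]
          exact Or.inl (Or.inr (by rw [bridge_cr T a x hpre ha hx]; exact h))⟩
      · exact ⟨0, by omega, a, ha, 0, by omega, x, hx, by
          simp only [chk, Bool.or_eq_true]
          exact Or.inr (by rw [bridge_cc T a x hpre ha hx]; exact h)⟩
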